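-- pv_equiv track=rewrite | github.com/nayanamana/PhD | scripts_3/lib/heuristics.py | find_no_of_consecutive_characters
-- ===== SOURCE A (Python) =====
-- from collections import Counter
-- from collections import Counter
--
-- def find_no_of_consecutive_characters(domain):
--    tot = 0
--
--    #https://www.kite.com/python/answers/how-to-count-the-number-of-repeated-characters-in-a-string-in-python
--    frequencies = Counter(domain)
--    repeated = {}
--    for key, value in frequencies.items():
--       if value > 1:
--          repeated[key] = value
--
--    for key, value in repeated.items():
--       tot += value
--
--    return tot
-- ===== SOURCE B (Python) =====
-- def find_no_of_consecutive_characters(domain):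
--     seen = set()
--     dup = set()
--     for ch in domain:
--         if ch in seen:
--             dup.add(ch)
--         else:
--             seen.add(ch)
--     tot = 0
--     for ch in domain:
--         if ch in dup:
--             tot += 1
--     return tot
-- ===== Notes on version B (the rewrite author's own statement) =====
-- stated objective: alternative
-- what changed: B never builds a frequency table: one pass over the string maintains two sets (characters seen once, characters seen again) and a second pass counts the positions whose character landed in the duplicate set, which equals the sum of frequencies of repeated characters.
import Mathlib
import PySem

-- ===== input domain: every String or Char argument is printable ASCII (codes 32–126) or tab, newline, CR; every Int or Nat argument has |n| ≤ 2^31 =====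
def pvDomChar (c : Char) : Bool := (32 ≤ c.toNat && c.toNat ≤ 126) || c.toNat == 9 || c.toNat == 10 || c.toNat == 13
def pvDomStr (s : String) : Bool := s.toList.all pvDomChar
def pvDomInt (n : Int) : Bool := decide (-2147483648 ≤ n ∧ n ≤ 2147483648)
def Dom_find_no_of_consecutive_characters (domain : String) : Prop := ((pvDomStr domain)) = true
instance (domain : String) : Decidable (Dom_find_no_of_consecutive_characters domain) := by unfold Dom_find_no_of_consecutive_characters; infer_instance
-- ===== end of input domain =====

-- B replaces the Counter and the two dict passes by a seen/duplicate pair of sets built in one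
-- pass, then counts the positions whose character is in the duplicate set (alternative algorithm).


-- ===== PORT A =====
def find_no_of_consecutive_characters (domain : String) : Int :=
  let tot : Int := 0
  let frequencies := PySem.Dict.counter domain.toList
  let repeated : PySem.Dict Char Int :=
    frequencies.items.foldl (fun r kv => if kv.2 > 1 then r.insert kv.1 kv.2 else r) PySem.Dict.empty
  repeated.items.foldl (fun t kv => t + kv.2) tot

-- ===== PORT B =====
def find_no_of_consecutive_characters_alt (domain : String) : Int :=
  let chars := domain.toList
  let sd := chars.foldl
    (fun (p : PySem.Set Char × PySem.Set Char) ch =>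
      if PySem.Set.contains p.1 ch then (p.1, PySem.Set.add p.2 ch)
      else (PySem.Set.add p.1 ch, p.2))
    (PySem.Set.empty, PySem.Set.empty)
  chars.foldl (fun tot ch => if PySem.Set.contains sd.2 ch then tot + 1 else tot) 0

-- ===== PRECONDITION & SPEC =====
def Spec_find_no_of_consecutive_characters (domain : String) (out : Int) : Prop := out = find_no_of_consecutive_characters_alt domain
instance (domain : String) (out : Int) : Decidable (Spec_find_no_of_consecutive_characters domain out) := by unfold Spec_find_no_of_consecutive_characters; infer_instance

-- ===== CLAIM (what is proved, stated in full; the proofs are below) =====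
def Claim_equal_find_no_of_consecutive_characters : Prop := ∀ (domain : String), Dom_find_no_of_consecutive_characters domain → Spec_find_no_of_consecutive_characters domain (find_no_of_consecutive_characters domain)

-- ===== LEMMAS AND PROOFS =====

-- A's conditional-insert loop is the plain insert loop over the filtered item list
theorem foldl_if_insert_filter (l : List (Char × Int)) (d : PySem.Dict Char Int) :
    l.foldl (fun r kv => if kv.2 > 1 then r.insert kv.1 kv.2 else r) d
      = (l.filter (fun kv => decide (kv.2 > 1))).foldl (fun r kv => r.insert kv.1 kv.2) d := by
  induction l generalizing d with
  | nil => rfl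
  | cons kv rest ih =>
      by_cases h : kv.2 > 1 <;> simp [List.foldl, List.filter, h, ih]

theorem foldl_add_snd_acc (l : List (Char × Int)) (a : Int) :
    l.foldl (fun t kv => t + kv.2) a = a + (l.map Prod.snd).sum := by
  induction l generalizing a with
  | nil => simp
  | cons kv rest ih => simp [List.foldl, ih, add_assoc]

-- grouping by character: a countP over positions is the sum, over the distinct characters
-- that satisfy the predicate, of their multiplicities
theorem countP_eq_sum_counts (xs : List Char) (p : Char → Bool) :
    ((((PySem.Set.ofList xs).filter p).map (fun k => xs.count k)).sum)
      = xs.countP p := by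
  have hnodup : ((PySem.Set.ofList xs).filter p).Nodup :=
    (PySem.Set.nodup_ofList xs).filter p
  have hset : ((PySem.Set.ofList xs).filter p).toFinset = (xs.filter p).toFinset := by
    ext a
    simp only [List.mem_toFinset, List.mem_filter, PySem.Set.mem_ofList]
  calc (((PySem.Set.ofList xs).filter p).map (fun k => xs.count k)).sum
      = ((PySem.Set.ofList xs).filter p).toFinset.sum (fun k => xs.count k) :=
        (List.sum_toFinset _ hnodup).symm
    _ = (xs.filter p).toFinset.sum (fun k => xs.count k) := by rw [hset]
    _ = (xs.filter p).toFinset.sum (fun k => (xs.filter p).count k) := by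
        refine Finset.sum_congr rfl (fun a ha => ?_)
        have hpa : p a = true := (List.mem_filter.mp (List.mem_toFinset.mp ha)).2
        exact (List.count_filter hpa).symm
    _ = (xs.filter p).length := List.sum_toFinset_count_eq_length _
    _ = xs.countP p := (List.countP_eq_length_filter ..).symm

-- membership invariant of B's seen/dup loop: after the pass over l starting from (seen, dup),
-- the first set holds seen ∪ l and the second holds dup ∪ (seen ∩ l) ∪ {repeated in l}
theorem seen_dup_mem (l : List Char) (seen dup : PySem.Set Char) (c : Char) :
    (c ∈ (l.foldl
        (fun (p : PySem.Set Char × PySem.Set Char) ch =>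
          if PySem.Set.contains p.1 ch then (p.1, PySem.Set.add p.2 ch)
          else (PySem.Set.add p.1 ch, p.2)) (seen, dup)).1
      ↔ c ∈ seen ∨ c ∈ l)
    ∧ (c ∈ (l.foldl
        (fun (p : PySem.Set Char × PySem.Set Char) ch =>
          if PySem.Set.contains p.1 ch then (p.1, PySem.Set.add p.2 ch)
          else (PySem.Set.add p.1 ch, p.2)) (seen, dup)).2
      ↔ c ∈ dup ∨ (c ∈ seen ∧ c ∈ l) ∨ 2 ≤ l.count c) := by
  induction l generalizing seen dup with
  | nil => simp
  | cons x rest ih =>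
      by_cases hx : x ∈ seen
      · have hc : PySem.Set.contains seen x = true := (PySem.Set.contains_iff seen x).mpr hx
        simp only [List.foldl_cons, hc, if_true]
        obtain ⟨ih1, ih2⟩ := ih seen (PySem.Set.add dup x)
        refine ⟨ih1.trans ?_, ih2.trans ?_⟩
        · rw [List.mem_cons]
          constructor
          · rintro (h | h)
            · exact Or.inl h
            · exact Or.inr (Or.inr h)
          · rintro (h | rfl | h)
            · exact Or.inl h
            · exact Or.inl hx
            · exact Or.inr h
        · rw [PySem.Set.mem_add, List.mem_cons]
          by_cases hcx : c = x
          · subst hcx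
            simp [hx]
          · have hxc : x ≠ c := fun h => hcx h.symm
            have hcount : (x :: rest).count c = rest.count c := by
              simp [hxc]
            rw [hcount]
            constructor
            · rintro ((h | h) | h)
              · exact Or.inl h
              · exact absurd h hcx
              · rcases h with ⟨hs, hr⟩ | h
                · exact Or.inr (Or.inl ⟨hs, Or.inr hr⟩)
                · exact Or.inr (Or.inr h)
            · rintro (h | ⟨hs, hcx2 | hr⟩ | h)
              · exact Or.inl (Or.inl h)
              · exact absurd hcx2 hcx
              · exact Or.inr (Or.inl ⟨hs, hr⟩)
              · exact Or.inr (Or.inr h)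
      · have hc : PySem.Set.contains seen x = false := by
          simp [PySem.Set.contains_eq_listContains, hx]
        simp only [List.foldl_cons, hc, Bool.false_eq_true, if_false]
        obtain ⟨ih1, ih2⟩ := ih (PySem.Set.add seen x) dup
        refine ⟨ih1.trans ?_, ih2.trans ?_⟩
        · rw [PySem.Set.mem_add, List.mem_cons]
          tauto
        · by_cases hcx : c = x
          · subst hcx
            rw [PySem.Set.mem_add, List.mem_cons, List.count_cons_self]
            constructor
            · rintro (h | ⟨_, hr⟩ | h)
              · exact Or.inl h
              · exact Or.inr (Or.inr (by have := List.count_pos_iff.mpr hr; omega))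
              · exact Or.inr (Or.inr (by omega))
            · rintro (h | ⟨hs, _⟩ | h)
              · exact Or.inl h
              · exact absurd hs hx
              · by_cases hr : c ∈ rest
                · exact Or.inr (Or.inl ⟨Or.inr rfl, hr⟩)
                · exact absurd h (by have := List.count_eq_zero.mpr hr; omega)
          · have hxc : x ≠ c := fun h => hcx h.symm
            have hcount : (x :: rest).count c = rest.count c := by
              simp [hxc]
            rw [PySem.Set.mem_add, List.mem_cons, hcount]
            tauto

-- the core equality, over the character list
theorem pv_key (xs : List Char) :
    (((PySem.Dict.counter xs).items.foldl
        (fun r kv => if kv.2 > 1 then r.insert kv.1 kv.2 else r) PySem.Dict.empty).items.foldl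
        (fun t kv => t + kv.2) (0 : Int))
      = (xs.foldl
          (fun tot ch =>
            if PySem.Set.contains
                (xs.foldl
                  (fun (p : PySem.Set Char × PySem.Set Char) ch =>
                    if PySem.Set.contains p.1 ch then (p.1, PySem.Set.add p.2 ch)
                    else (PySem.Set.add p.1 ch, p.2))
                  (PySem.Set.empty, PySem.Set.empty)).2 ch
            then tot + 1 else tot) 0) := by
  set l := (PySem.Dict.counter xs).items with hl
  have hitems : l = (PySem.Set.ofList xs).map (fun k => (k, (xs.count k : Int))) := by
    rw [hl, PySem.Dict.items_counter]
  have hnodup : (l.map Prod.fst).Nodup := by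
    have := PySem.Dict.nodup_keys_counter (xs := xs)
    simpa [PySem.Dict.keys, hl] using this
  have hfnodup : ((l.filter (fun kv => decide (kv.2 > 1))).map Prod.fst).Nodup :=
    (List.filter_sublist.map Prod.fst).nodup hnodup
  have hrep :
      (l.foldl (fun r kv => if kv.2 > 1 then r.insert kv.1 kv.2 else r) PySem.Dict.empty).items
        = l.filter (fun kv => decide (kv.2 > 1)) := by
    rw [foldl_if_insert_filter]
    have := PySem.Dict.items_foldl_insert_fresh (l.filter (fun kv => decide (kv.2 > 1)))
      Prod.fst Prod.snd PySem.Dict.empty (fun a _ => PySem.Dict.contains_empty _) hfnodup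
    simpa using this
  rw [hrep, foldl_add_snd_acc]
  -- push the filter/map through the counter's item list
  have hfm : (l.filter (fun kv => decide (kv.2 > 1))).map Prod.snd
      = ((PySem.Set.ofList xs).filter (fun k => decide (1 < xs.count k))).map
          (fun k => (xs.count k : Int)) := by
    rw [hitems, List.filter_map, List.map_map]
    congr 1
    · congr 1
      funext k
      simp only [Function.comp, gt_iff_lt, Nat.one_lt_cast]
  -- B's second loop is a countP over the duplicate-set membership test
  set dup := (xs.foldl
      (fun (p : PySem.Set Char × PySem.Set Char) ch =>
        if PySem.Set.contains p.1 ch then (p.1, PySem.Set.add p.2 ch)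
        else (PySem.Set.add p.1 ch, p.2))
      (PySem.Set.empty, PySem.Set.empty)).2 with hdup
  have hdupmem : ∀ c, c ∈ dup ↔ 1 < xs.count c := by
    intro c
    have h := (seen_dup_mem xs PySem.Set.empty PySem.Set.empty c).2
    rw [hdup]
    refine h.trans ?_
    constructor
    · rintro (h | ⟨h1, _⟩ | hc)
      · exact absurd h List.not_mem_nil
      · exact absurd h1 List.not_mem_nil
      · omega
    · intro hc
      exact Or.inr (Or.inr (by omega))
  have hB : xs.foldl (fun tot ch => if PySem.Set.contains dup ch then tot + 1 else tot) (0 : Int)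
      = (xs.countP (fun ch => decide (1 < xs.count ch)) : Int) := by
    rw [PySem.List.foldl_if_add_one]
    rw [zero_add]
    congr 1
    refine List.countP_congr (fun c _ => ?_)
    constructor
    · intro h
      exact decide_eq_true ((hdupmem c).mp ((PySem.Set.contains_iff _ _).mp h))
    · intro h
      exact (PySem.Set.contains_iff _ _).mpr ((hdupmem c).mpr (of_decide_eq_true h))
  rw [hB, zero_add, hfm]
  have h1 : (((PySem.Set.ofList xs).filter (fun k => decide (1 < xs.count k))).map
        (fun k => (xs.count k : Int))).sum
      = ((((PySem.Set.ofList xs).filter (fun k => decide (1 < xs.count k))).map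
          (fun k => xs.count k)).sum : Int) := by
    rw [Nat.cast_list_sum, List.map_map]; rfl
  rw [h1, countP_eq_sum_counts xs (fun k => decide (1 < xs.count k))]

-- ===== VERDICT (by name: the statement is the Claim_ definition above) =====
theorem find_no_of_consecutive_characters_spec : Claim_equal_find_no_of_consecutive_characters := by
  intro domain _
  unfold Spec_find_no_of_consecutive_characters
  unfold find_no_of_consecutive_characters find_no_of_consecutive_characters_alt
  exact pv_key domain.toList
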